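-- pv_equiv track=rewrite | github.com/bobrolevv/contest | handman2.py | handman
-- ===== SOURCE A (Python) =====
-- def handman(data: str, finger: str) -> int:
--     time_moments: list = [0, 1, 2, 3, 4, 5, 6, 7, 8, 9]
--     fingers: int = int(finger)*2
--     score: int = 0
--     for time in time_moments:
--         res = find_t(data, str(time))
--         if 0 < res <= fingers: score += 1
--     return score
--
-- def find_t(data: list, symb: str) -> int:
--     start: int = -1
--     count: int = 0
--     for string in data:
--         while True:
--             start = string.find(symb, start + 1)
--             if start == -1:
--                 break
--             count += 1
--     return count
-- ===== SOURCE B (Python) =====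
-- def handman(data: str, finger: str) -> int:
--     fingers = int(finger) * 2
--     ds = sorted(ch for ch in data if ch.isdigit())
--     score = 0
--     i = 0
--     n = len(ds)
--     while i < n:
--         j = i + 1
--         while j < n and ds[j] == ds[i]:
--             j += 1
--         if j - i <= fingers:
--             score += 1
--         i = j
--     return score
-- ===== Notes on version B (the rewrite author's own statement) =====
-- stated objective: alternative
-- what changed: B extracts the digit characters in one pass, sorts them, and scores runs of equal characters in a single scan (run length = that digit's count), instead of A's ten whole-string scans each driven by a repeated str.find loop.
import Mathlib
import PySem

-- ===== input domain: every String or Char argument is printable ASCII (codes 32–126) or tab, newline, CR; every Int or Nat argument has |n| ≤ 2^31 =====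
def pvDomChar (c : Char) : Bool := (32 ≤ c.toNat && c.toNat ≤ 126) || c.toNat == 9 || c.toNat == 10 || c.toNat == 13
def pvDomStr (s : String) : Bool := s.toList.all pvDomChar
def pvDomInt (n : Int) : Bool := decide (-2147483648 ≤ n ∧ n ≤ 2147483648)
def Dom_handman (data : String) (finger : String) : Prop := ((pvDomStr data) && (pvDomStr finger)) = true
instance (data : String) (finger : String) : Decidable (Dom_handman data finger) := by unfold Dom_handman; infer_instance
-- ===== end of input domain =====

-- B sorts the extracted digit characters and scores runs of equal characters in one scan,
-- instead of A's ten find-driven scans of the whole string (alternative algorithm; return value only).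

-- ===== PORT A =====
-- inner 'while True' of find_t; the fuel argument only guards termination (find's result strictly increases)
def findTLoop : Nat → List Char → List Char → Int → Int → Int × Int
  | 0, _, _, start, count => (start, count)
  | fuel+1, s, symb, start, count =>
      let start' := PySem.Chars.findFrom s symb (start + 1) none
      if start' = -1 then (start', count)
      else findTLoop fuel s symb start' (count + 1)

def find_t (data : List Char) (symb : List Char) : Int :=
  (data.foldl (fun (sc : Int × Int) (c : Char) =>
      findTLoop ([c].length + 1) [c] symb sc.1 sc.2) (-1, 0)).2

def handman (data : String) (finger : String) : Int :=
  let time_moments : List Int := [0, 1, 2, 3, 4, 5, 6, 7, 8, 9]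
  match PySem.Int.ofStr? finger with
  | none => 0   -- unreachable under Pre_handman (Python raises ValueError)
  | some f =>
    let fingers : Int := f * 2
    time_moments.foldl (fun score time =>
      let res := find_t data.toList (PySem.Int.toChars time)
      if 0 < res ∧ res ≤ fingers then score + 1 else score) 0

-- ===== PORT B =====
-- the outer while loop of Source B: each step consumes one run of equal characters
-- (the inner 'while j < n and ds[j] == ds[i]' is the takeWhile, advancing past the run)
def runScore (fingers : Int) : List Char → Int
  | [] => 0
  | c :: t =>
      let run := t.takeWhile (fun x => x == c)
      let rest := t.dropWhile (fun x => x == c)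
      (if ((1 + run.length : Int) ≤ fingers) then 1 else 0) + runScore fingers rest
termination_by l => l.length
decreasing_by
  simp only [List.length_cons]
  exact Nat.lt_succ_of_le (List.length_dropWhile_le _ _)

def handman_alt (data : String) (finger : String) : Int :=
  match PySem.Int.ofStr? finger with
  | none => 0   -- unreachable under Pre_handman (Python raises ValueError)
  | some f =>
    let fingers : Int := f * 2
    let ds := PySem.List.sorted (data.toList.filter (fun ch => PySem.Chars.isdigit ch)) (fun c => c.toNat) false
    runScore fingers ds

-- ===== PRECONDITION & SPEC =====
-- Pre_ excludes exactly the inputs where int(finger) raises ValueError (both A and B raise there).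
def Pre_handman (data : String) (finger : String) : Prop := (PySem.Int.ofStr? finger).isSome = true
instance (data : String) (finger : String) : Decidable (Pre_handman data finger) := by unfold Pre_handman; infer_instance
def pvWitness_handman : String × String := ("112233", "2")
def Spec_handman (data : String) (finger : String) (out : Int) : Prop := out = handman_alt data finger
instance (data : String) (finger : String) (out : Int) : Decidable (Spec_handman data finger out) := by unfold Spec_handman; infer_instance

-- ===== CLAIM (what is proved, stated in full; the proofs are below) =====
def Claim_equal_handman : Prop := ∀ (data : String) (finger : String), Dom_handman data finger → Pre_handman data finger → Spec_handman data finger (handman data finger)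

-- ===== LEMMAS AND PROOFS =====

-- ---- A side: find_t over single characters counts occurrences ----
lemma find_single (c d : Char) : PySem.Chars.find [c] [d] = if c = d then 0 else -1 := by
  by_cases h : c = d
  · subst h; simp [PySem.Chars.find, PySem.Chars.find.go]
  · rw [if_neg h, PySem.Chars.find_eq_neg_one_iff]
    intro hinf
    exact h (List.mem_singleton.mp (hinf.subset (List.mem_singleton_self d))).symm

lemma findFrom_one (c d : Char) : PySem.Chars.findFrom [c] [d] 1 none = -1 := by
  rw [show (1:Int) = ((1:Nat):Int) by norm_num, PySem.Chars.findFrom_natCast _ _ 1 (by simp)]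
  simp
  intro h
  exact absurd ((PySem.Chars.find_eq_neg_one_iff [] [d]).mpr (by simp)) h

lemma findTLoop_single (c d : Char) (k : Int) :
    findTLoop 2 [c] [d] (-1) k = (-1, k + if c = d then 1 else 0) := by
  by_cases h : c = d
  · subst h
    simp [findTLoop, PySem.Chars.findFrom_zero, find_single, findFrom_one]
  · simp [findTLoop, PySem.Chars.findFrom_zero, find_single, h]

lemma find_t_foldl (l : List Char) (d : Char) (k : Int) :
    l.foldl (fun (sc : Int × Int) (c : Char) =>
      findTLoop ([c].length + 1) [c] [d] sc.1 sc.2) (-1, k) = (-1, k + l.count d) := by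
  induction l generalizing k with
  | nil => simp
  | cons c t ih =>
      rw [List.foldl_cons,
        show (findTLoop ([c].length + 1) [c] [d] (-1, k).1 (-1, k).2) = findTLoop 2 [c] [d] (-1) k from rfl,
        findTLoop_single, ih]
      by_cases h : c = d
      · subst h; simp; ring
      · simp [h]

lemma find_t_eq_count (l : List Char) (d : Char) :
    find_t l [d] = (l.count d : Int) := by
  unfold find_t
  rw [find_t_foldl]
  simp

-- A's score loop is an accumulated sum of indicators
lemma foldl_score (P : Int → Prop) [DecidablePred P] (l : List Int) (a : Int) :
    l.foldl (fun score time => if P time then score + 1 else score) a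
      = a + (l.map (fun t => if P t then (1:Int) else 0)).sum := by
  induction l generalizing a with
  | nil => simp
  | cons x t ih =>
      simp only [List.foldl_cons, List.map_cons, List.sum_cons, ih]
      by_cases h : P x <;> simp [h] <;> ring

-- ---- B side: the run scan over a sorted list sums indicators over its distinct characters ----
lemma runScore_sorted (f : Int) (l : List Char)
    (hs : l.Pairwise (fun a b : Char => a.toNat ≤ b.toNat)) :
    runScore f l = ∑ d ∈ l.toFinset,
      (if 0 < (l.count d : Int) ∧ (l.count d : Int) ≤ f then 1 else 0) := by
  induction hn : l.length using Nat.strong_induction_on generalizing l with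
  | _ n ih =>
    match l, hs with
    | [], _ => simp [runScore]
    | c :: t, hs =>
      have hle : ∀ x ∈ t, c.toNat ≤ x.toNat := fun x hx => (List.pairwise_cons.mp hs).1 x hx
      have hst : t.Pairwise (fun a b : Char => a.toNat ≤ b.toNat) := (List.pairwise_cons.mp hs).2
      set run := t.takeWhile (fun x => x == c) with hrun
      set rest := t.dropWhile (fun x => x == c) with hrest
      have hsplit : run ++ rest = t := List.takeWhile_append_dropWhile
      have hrunmem : ∀ x ∈ run, x = c := by
        intro x hx
        have := List.mem_takeWhile_imp hx
        exact eq_of_beq this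
      have char_inj : ∀ a b : Char, a.toNat = b.toNat → a = b :=
        fun a b h => Char.ext (UInt32.toNat_inj.mp h)
      have hcrest : c ∉ rest := by
        intro hc
        rcases hrr : rest with _ | ⟨r, rs⟩
        · rw [hrr] at hc; simp at hc
        · have hhead : (r == c) = false := by
            have h0 := List.head?_dropWhile_not (fun x => x == c) t
            rw [← hrest, hrr] at h0
            simpa using h0
          have hrne' : r ≠ c := by intro h; rw [h] at hhead; simp at hhead
          have hrt : r ∈ t := by
            rw [← hsplit, hrr]; exact List.mem_append_right _ List.mem_cons_self
          have hcr : c.toNat < r.toNat :=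
            lt_of_le_of_ne (hle r hrt) (fun h => hrne' (char_inj r c h.symm))
          rw [hrr] at hc
          rcases List.mem_cons.mp hc with h | h
          · exact hrne' h.symm
          · have hrestp2 : rest.Pairwise (fun a b : Char => a.toNat ≤ b.toNat) :=
              hst.sublist (List.dropWhile_sublist _)
            rw [hrr] at hrestp2
            have := (List.pairwise_cons.mp hrestp2).1 c h
            omega
      have hrestp : rest.Pairwise (fun a b : Char => a.toNat ≤ b.toNat) :=
        hst.sublist (List.dropWhile_sublist _)
      have hcount_c : (c :: t).count c = 1 + run.length := by
        rw [← hsplit, List.count_cons_self, List.count_append]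
        have h1 : run.count c = run.length := List.count_eq_length.mpr (by
          intro x hx; have := hrunmem x hx; simp [this])
        have h2 : rest.count c = 0 := List.count_eq_zero.mpr hcrest
        omega
      have hcount_ne : ∀ d, d ≠ c → (c :: t).count d = rest.count d := by
        intro d hd
        rw [← hsplit, List.count_cons_of_ne (fun hh => hd hh.symm), List.count_append]
        have : run.count d = 0 := List.count_eq_zero.mpr (by
          intro hm; exact hd (hrunmem d hm))
        omega
      have hfin : (c :: t).toFinset = insert c rest.toFinset := by
        ext x
        simp only [List.toFinset_cons, Finset.mem_insert, List.mem_toFinset]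
        constructor
        · rintro (h | h)
          · exact Or.inl h
          · rw [← hsplit] at h
            rcases List.mem_append.mp h with h | h
            · exact Or.inl (hrunmem x h)
            · exact Or.inr h
        · rintro (h | h)
          · exact Or.inl h
          · exact Or.inr (by rw [← hsplit]; exact List.mem_append_right _ h)
      have hcfin : c ∉ rest.toFinset := by simpa using hcrest
      have hrl : rest.length < n := by
        rw [← hn]
        simp only [List.length_cons]
        exact Nat.lt_succ_of_le (List.length_dropWhile_le _ _)
      have hIH := ih rest.length hrl rest hrestp rfl
      rw [runScore, ← hrun, ← hrest, hIH, hfin, Finset.sum_insert hcfin]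
      congr 1
      · rw [hcount_c]
        have hpos : (0:Int) < ((1 + run.length : Nat) : Int) := by positivity
        by_cases h : ((1:Int) + run.length ≤ f)
        · rw [if_pos h, if_pos ⟨hpos, by push_cast; omega⟩]
        · rw [if_neg h, if_neg (by push_cast; omega)]
      · apply Finset.sum_congr rfl
        intro d hd
        have hdne : d ≠ c := fun h => hcfin (h ▸ hd)
        rw [hcount_ne d hdne]

-- digits are among the ten digit characters
lemma isdigit_mem (c : Char) (h : PySem.Chars.isdigit c = true) :
    c ∈ ({'0','1','2','3','4','5','6','7','8','9'} : Finset Char) := by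
  simp only [PySem.Chars.isdigit, Bool.and_eq_true, decide_eq_true_eq] at h
  obtain ⟨h1, h2⟩ := h
  have hv1 : 48 ≤ c.toNat := h1
  have hv2 : c.toNat ≤ 57 := h2
  have : c.toNat = 48 ∨ c.toNat = 49 ∨ c.toNat = 50 ∨ c.toNat = 51 ∨ c.toNat = 52 ∨
         c.toNat = 53 ∨ c.toNat = 54 ∨ c.toNat = 55 ∨ c.toNat = 56 ∨ c.toNat = 57 := by omega
  have hchar : ∀ m : Char, c.toNat = m.toNat → c = m := by
    intro m hm
    exact Char.ext (by
      have : c.val.toNat = m.val.toNat := hm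
      exact UInt32.toNat_inj.mp this)
  rcases this with h|h|h|h|h|h|h|h|h|h
  · have hc := hchar '0' (h.trans rfl); subst hc; decide
  · have hc := hchar '1' (h.trans rfl); subst hc; decide
  · have hc := hchar '2' (h.trans rfl); subst hc; decide
  · have hc := hchar '3' (h.trans rfl); subst hc; decide
  · have hc := hchar '4' (h.trans rfl); subst hc; decide
  · have hc := hchar '5' (h.trans rfl); subst hc; decide
  · have hc := hchar '6' (h.trans rfl); subst hc; decide
  · have hc := hchar '7' (h.trans rfl); subst hc; decide
  · have hc := hchar '8' (h.trans rfl); subst hc; decide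
  · have hc := hchar '9' (h.trans rfl); subst hc; decide

-- ===== VERDICT (by name: the statement is the Claim_ definition above) =====
theorem handman_spec : Claim_equal_handman := by
  intro data finger _ hpre
  unfold Pre_handman at hpre
  obtain ⟨f, hf⟩ := Option.isSome_iff_exists.mp hpre
  unfold Spec_handman handman handman_alt
  rw [hf]
  simp only []
  set l := data.toList with hl
  set ds := PySem.List.sorted (l.filter (fun ch => PySem.Chars.isdigit ch)) (fun c => c.toNat) false with hds
  have hperm : ds.Perm (l.filter (fun ch => PySem.Chars.isdigit ch)) := PySem.List.sorted_perm _ _ _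
  have hsorted : ds.Pairwise (fun a b : Char => a.toNat ≤ b.toNat) := PySem.List.sorted_pairwise _ _
  have hcount : ∀ d : Char, PySem.Chars.isdigit d = true → (ds.count d : Int) = (l.count d : Int) := by
    intro d hd
    rw [hperm.count_eq, List.count_filter]
    simp [hd]
  have hmem : ∀ d : Char, d ∈ ds → PySem.Chars.isdigit d = true := by
    intro d hd
    have := hperm.mem_iff.mp hd
    exact (List.mem_filter.mp this).2
  -- B side: run scan = sum over the ten digit characters
  rw [runScore_sorted (f*2) ds hsorted]
  have hsub : ds.toFinset ⊆ ({'0','1','2','3','4','5','6','7','8','9'} : Finset Char) := by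
    intro d hd
    exact isdigit_mem d (hmem d (List.mem_toFinset.mp hd))
  rw [Finset.sum_subset hsub (by
    intro d _ hnd
    have : ds.count d = 0 := List.count_eq_zero.mpr (fun h => hnd (List.mem_toFinset.mpr h))
    simp [this])]
  have hsum :
      (∑ d ∈ ({'0','1','2','3','4','5','6','7','8','9'} : Finset Char),
        (if 0 < (ds.count d : Int) ∧ (ds.count d : Int) ≤ f*2 then (1:Int) else 0))
      = (∑ d ∈ ({'0','1','2','3','4','5','6','7','8','9'} : Finset Char),
        (if 0 < (l.count d : Int) ∧ (l.count d : Int) ≤ f*2 then (1:Int) else 0)) := by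
    apply Finset.sum_congr rfl
    intro d hd
    have hdig : PySem.Chars.isdigit d = true := by
      fin_cases hd <;> decide
    rw [hcount d hdig]
  rw [hsum]
  -- A side: fold over the ten time moments = sum of indicators
  rw [foldl_score (fun time => 0 < find_t l (PySem.Int.toChars time) ∧
        find_t l (PySem.Int.toChars time) ≤ f*2)]
  simp only [List.map_cons, List.map_nil, List.sum_cons, List.sum_nil, zero_add]
  rw [show PySem.Int.toChars 0 = ['0'] from rfl, show PySem.Int.toChars 1 = ['1'] from rfl,
    show PySem.Int.toChars 2 = ['2'] from rfl, show PySem.Int.toChars 3 = ['3'] from rfl,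
    show PySem.Int.toChars 4 = ['4'] from rfl, show PySem.Int.toChars 5 = ['5'] from rfl,
    show PySem.Int.toChars 6 = ['6'] from rfl, show PySem.Int.toChars 7 = ['7'] from rfl,
    show PySem.Int.toChars 8 = ['8'] from rfl, show PySem.Int.toChars 9 = ['9'] from rfl]
  simp only [find_t_eq_count]
  rw [show ({'0','1','2','3','4','5','6','7','8','9'} : Finset Char)
      = insert '0' (insert '1' (insert '2' (insert '3' (insert '4' (insert '5'
          (insert '6' (insert '7' (insert '8' ({'9'} : Finset Char))))))))) from rfl]
  repeat rw [Finset.sum_insert (by decide)]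
  rw [Finset.sum_singleton]
  ring
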